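-- pv_equiv track=rewrite | github.com/jansvobodaa/nurikabe.py | # obecne.py | findCommonNeighbors
-- ===== SOURCE A (Python) =====
-- def findNeighbors(matrix,x,y):
--     directions = [[-1, 0], [1, 0], [0, -1], [0, 1]]
--     neighbors = []
--     for direction in directions:
--         dx, dy = x + direction[0], y + direction[1]
--         if 0 <= dx < len(matrix) and 0 <= dy < len(matrix[0]):
--             neighbors.append([dx, dy])
--     return neighbors
--
-- def findCommonNeighbors(matrix, x, y, nx, ny):          #hleda spolecne sousedy 2 bunek
--     xy_neighbors = findNeighbors(matrix, x, y)
--     nxy_neighbors = findNeighbors(matrix, nx, ny)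
--     common = []
--     for i in range(len(xy_neighbors)):
--         for l in range(len(nxy_neighbors)):
--             if xy_neighbors[i] == nxy_neighbors[l]:
--                 common.append(xy_neighbors[i])
--     return common
-- ===== SOURCE B (Python) =====
-- def findCommonNeighbors(matrix, x, y, nx, ny):
--     rows = len(matrix)
--     cols = len(matrix[0]) if matrix else 0
--     common = []
--     for dx, dy in ((-1, 0), (1, 0), (0, -1), (0, 1)):
--         px, py = x + dx, y + dy
--         if 0 <= px < rows and 0 <= py < cols and abs(px - nx) + abs(py - ny) == 1:
--             common.append([px, py])
--     return common
-- ===== Notes on version B (the rewrite author's own statement) =====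
-- stated objective: simpler
-- what changed: Drops the second neighbor list and the nested intersection loops entirely: a single pass over the four candidate neighbors of (x,y) tests adjacency to (nx,ny) by the closed-form Manhattan-distance-1 condition abs(px-nx)+abs(py-ny)==1.
import Mathlib
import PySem

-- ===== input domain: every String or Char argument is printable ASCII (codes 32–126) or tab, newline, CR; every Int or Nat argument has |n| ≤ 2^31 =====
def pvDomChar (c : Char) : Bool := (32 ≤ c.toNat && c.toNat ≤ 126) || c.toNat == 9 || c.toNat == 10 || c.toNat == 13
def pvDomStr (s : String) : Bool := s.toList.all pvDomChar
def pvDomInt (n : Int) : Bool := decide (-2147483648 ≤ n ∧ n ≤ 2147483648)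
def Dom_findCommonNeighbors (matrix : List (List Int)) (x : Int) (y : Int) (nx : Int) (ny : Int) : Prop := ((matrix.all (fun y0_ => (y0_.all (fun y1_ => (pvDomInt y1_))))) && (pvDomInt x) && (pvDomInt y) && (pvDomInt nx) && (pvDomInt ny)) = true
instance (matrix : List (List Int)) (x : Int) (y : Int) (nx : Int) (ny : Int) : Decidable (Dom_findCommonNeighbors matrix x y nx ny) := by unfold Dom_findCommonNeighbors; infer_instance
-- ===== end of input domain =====

-- B drops A's second neighbor list and nested intersection loops: one pass over the four
-- candidate neighbors of (x,y), keeping those at Manhattan distance 1 from (nx,ny) (simpler).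


-- ===== PORT A =====
-- directions = [[-1,0],[1,0],[0,-1],[0,1]] (each 2-element row ported as a pair)
def pvDirsA : List (Int × Int) := [(-1, 0), (1, 0), (0, -1), (0, 1)]

-- findNeighbors: `matrix[0]` is only evaluated when 0 <= dx < len(matrix) (short-circuit),
-- so `matrix.headD []` is exact there.
def findNeighborsA (matrix : List (List Int)) (x : Int) (y : Int) : List (List Int) :=
  pvDirsA.foldl (fun neighbors d =>
    let dx := x + d.1
    let dy := y + d.2
    if 0 ≤ dx ∧ dx < (matrix.length : Int) ∧ 0 ≤ dy ∧ dy < ((matrix.headD []).length : Int)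
    then neighbors ++ [[dx, dy]] else neighbors) []

def findCommonNeighbors (matrix : List (List Int)) (x : Int) (y : Int) (nx : Int) (ny : Int) : List (List Int) :=
  let xy_neighbors := findNeighborsA matrix x y
  let nxy_neighbors := findNeighborsA matrix nx ny
  xy_neighbors.foldl (fun common a =>
    nxy_neighbors.foldl (fun c b => if a = b then c ++ [a] else c) common) []

-- ===== PORT B =====
def findCommonNeighbors_alt (matrix : List (List Int)) (x : Int) (y : Int) (nx : Int) (ny : Int) : List (List Int) :=
  let rows : Int := matrix.length
  let cols : Int := match matrix with | [] => 0 | r :: _ => r.length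
  ([(-1, 0), (1, 0), (0, -1), (0, 1)] : List (Int × Int)).foldl (fun common d =>
    let px := x + d.1
    let py := y + d.2
    if 0 ≤ px ∧ px < rows ∧ 0 ≤ py ∧ py < cols ∧ (px - nx).natAbs + (py - ny).natAbs = 1
    then common ++ [[px, py]] else common) []

-- ===== PRECONDITION & SPEC =====
def Spec_findCommonNeighbors (matrix : List (List Int)) (x : Int) (y : Int) (nx : Int) (ny : Int) (out : List (List Int)) : Prop := out = findCommonNeighbors_alt matrix x y nx ny
instance (matrix : List (List Int)) (x : Int) (y : Int) (nx : Int) (ny : Int) (out : List (List Int)) : Decidable (Spec_findCommonNeighbors matrix x y nx ny out) := by unfold Spec_findCommonNeighbors; infer_instance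

-- ===== CLAIM (what is proved, stated in full; the proofs are below) =====
def Claim_equal_findCommonNeighbors : Prop := ∀ (matrix : List (List Int)) (x : Int) (y : Int) (nx : Int) (ny : Int), Dom_findCommonNeighbors matrix x y nx ny → Spec_findCommonNeighbors matrix x y nx ny (findCommonNeighbors matrix x y nx ny)

-- ===== LEMMAS AND PROOFS =====

-- proof-side view of a cell's in-bounds neighbor pairs
def nbrsP (rows cols cx cy : Int) : List (Int × Int) :=
  (pvDirsA.filter (fun d =>
      decide (0 ≤ cx + d.1 ∧ cx + d.1 < rows ∧ 0 ≤ cy + d.2 ∧ cy + d.2 < cols))).map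
    (fun d => (cx + d.1, cy + d.2))

lemma pairToRow_inj : Function.Injective (fun p : Int × Int => [p.1, p.2]) := by
  intro p q h
  simp only [List.cons.injEq, and_true] at h
  exact Prod.ext h.1 h.2

lemma findNeighborsA_eq (matrix : List (List Int)) (cx cy : Int) :
    findNeighborsA matrix cx cy =
      (nbrsP (matrix.length : Int) ((matrix.headD []).length : Int) cx cy).map
        (fun p => [p.1, p.2]) := by
  simp only [findNeighborsA, nbrsP,
    PySem.List.foldl_append_ite (p := fun d : Int × Int =>
      0 ≤ cx + d.1 ∧ cx + d.1 < (matrix.length : Int) ∧ 0 ≤ cy + d.2 ∧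
        cy + d.2 < ((matrix.headD []).length : Int))
      (f := fun d : Int × Int => [cx + d.1, cy + d.2])]
  simp [List.map_map, Function.comp]

lemma nbrsP_nodup (rows cols cx cy : Int) : (nbrsP rows cols cx cy).Nodup := by
  apply List.Nodup.map
  · intro a b h
    have h1 : cx + a.1 = cx + b.1 := congrArg Prod.fst h
    have h2 : cy + a.2 = cy + b.2 := congrArg Prod.snd h
    exact Prod.ext (by omega) (by omega)
  · exact List.Nodup.filter _ (by decide)

-- membership in a cell's neighbor pairs = in-bounds and Manhattan distance 1
lemma mem_nbrsP (rows cols nx ny : Int) (p : Int × Int) :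
    p ∈ nbrsP rows cols nx ny ↔
      (0 ≤ p.1 ∧ p.1 < rows ∧ 0 ≤ p.2 ∧ p.2 < cols ∧
        (p.1 - nx).natAbs + (p.2 - ny).natAbs = 1) := by
  simp only [nbrsP, List.mem_map, List.mem_filter, pvDirsA]
  constructor
  · rintro ⟨d, ⟨hd, hb⟩, rfl⟩
    simp only [List.mem_cons, List.not_mem_nil, or_false] at hd
    simp only [decide_eq_true_eq] at hb
    rcases hd with rfl | rfl | rfl | rfl <;> simp_all
  · rintro ⟨h1, h2, h3, h4, h5⟩
    have hc : (p.1 = nx - 1 ∧ p.2 = ny) ∨ (p.1 = nx + 1 ∧ p.2 = ny) ∨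
        (p.1 = nx ∧ p.2 = ny - 1) ∨ (p.1 = nx ∧ p.2 = ny + 1) := by omega
    rcases hc with ⟨e1, e2⟩ | ⟨e1, e2⟩ | ⟨e1, e2⟩ | ⟨e1, e2⟩
    · exact ⟨(-1, 0), ⟨by simp, by simp only [decide_eq_true_eq]; omega⟩,
        Prod.ext (by omega) (by omega)⟩
    · exact ⟨(1, 0), ⟨by simp, by simp only [decide_eq_true_eq]; omega⟩,
        Prod.ext (by omega) (by omega)⟩
    · exact ⟨(0, -1), ⟨by simp, by simp only [decide_eq_true_eq]; omega⟩,
        Prod.ext (by omega) (by omega)⟩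
    · exact ⟨(0, 1), ⟨by simp, by simp only [decide_eq_true_eq]; omega⟩,
        Prod.ext (by omega) (by omega)⟩

-- A's inner loop over a duplicate-free list appends a once iff a is in the list
lemma inner_notmem (a : List Int) (ns : List (List Int)) (c : List (List Int))
    (h : a ∉ ns) :
    ns.foldl (fun c b => if a = b then c ++ [a] else c) c = c := by
  induction ns generalizing c with
  | nil => rfl
  | cons b t ih =>
    simp only [List.mem_cons, not_or] at h
    simp only [List.foldl_cons, if_neg h.1]
    exact ih _ h.2

lemma inner_fold (a : List Int) (ns : List (List Int)) (c : List (List Int))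
    (h : ns.Nodup) :
    ns.foldl (fun c b => if a = b then c ++ [a] else c) c =
      c ++ (if a ∈ ns then [a] else []) := by
  induction ns generalizing c with
  | nil => simp
  | cons b t ih =>
    rcases List.nodup_cons.mp h with ⟨hb, ht⟩
    by_cases hab : a = b
    · subst hab
      simp only [List.foldl_cons, if_pos]
      rw [inner_notmem a t _ hb]
      simp
    · simp only [List.foldl_cons, if_neg hab]
      rw [ih _ ht]
      simp [List.mem_cons, hab]

lemma filter_map_mem (f : Int × Int → List Int) (hf : Function.Injective f)
    (l L : List (Int × Int)) :
    (l.map f).filter (fun a => decide (a ∈ L.map f)) =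
      (l.filter (fun p => decide (p ∈ L))).map f := by
  rw [List.filter_map]
  congr 1
  apply List.filter_congr
  intro p _
  simp only [Function.comp_apply, decide_eq_decide, List.mem_map]
  constructor
  · rintro ⟨q, hq, hfq⟩; rwa [hf hfq] at hq
  · intro hp; exact ⟨p, hp, rfl⟩

lemma cols_eq (matrix : List (List Int)) :
    (match matrix with | [] => 0 | r :: _ => (r.length : Int)) = ((matrix.headD []).length : Int) := by
  cases matrix <;> rfl

lemma nbrsP_inter (rows cols x y nx ny : Int) :
    (nbrsP rows cols x y).filter (fun p => decide (p ∈ nbrsP rows cols nx ny)) =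
      (pvDirsA.filter (fun d =>
        decide (0 ≤ x + d.1 ∧ x + d.1 < rows ∧ 0 ≤ y + d.2 ∧ y + d.2 < cols ∧
          (x + d.1 - nx).natAbs + (y + d.2 - ny).natAbs = 1))).map
        (fun d => (x + d.1, y + d.2)) := by
  have hxy : nbrsP rows cols x y =
      (pvDirsA.filter (fun d =>
        decide (0 ≤ x + d.1 ∧ x + d.1 < rows ∧ 0 ≤ y + d.2 ∧ y + d.2 < cols))).map
        (fun d => (x + d.1, y + d.2)) := rfl
  rw [hxy, List.filter_map, List.filter_filter]
  congr 1
  apply List.filter_congr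
  intro d _
  have hmem := mem_nbrsP rows cols nx ny (x + d.1, y + d.2)
  by_cases h1 : (0 ≤ x + d.1 ∧ x + d.1 < rows ∧ 0 ≤ y + d.2 ∧ y + d.2 < cols) <;>
    by_cases h2 : ((x + d.1 - nx).natAbs + (y + d.2 - ny).natAbs = 1) <;>
      simp [hmem, h1, h2]

-- ===== VERDICT (by name: the statement is the Claim_ definition above) =====
theorem findCommonNeighbors_spec : Claim_equal_findCommonNeighbors := by
  intro matrix x y nx ny _
  unfold Spec_findCommonNeighbors findCommonNeighbors findCommonNeighbors_alt
  rw [cols_eq matrix]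
  set rows : Int := (matrix.length : Int)
  set cols : Int := ((matrix.headD []).length : Int)
  rw [findNeighborsA_eq, findNeighborsA_eq]
  -- collapse A's nested loop into a filter by membership
  have hnodup : ((nbrsP rows cols nx ny).map (fun p => [p.1, p.2])).Nodup :=
    (nbrsP_nodup rows cols nx ny).map pairToRow_inj
  have houter :
      ((nbrsP rows cols x y).map (fun p => [p.1, p.2])).foldl
        (fun common a =>
          ((nbrsP rows cols nx ny).map (fun p => [p.1, p.2])).foldl
            (fun c b => if a = b then c ++ [a] else c) common) [] =
      ((nbrsP rows cols x y).map (fun p => [p.1, p.2])).foldl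
        (fun common a =>
          common ++ (if a ∈ (nbrsP rows cols nx ny).map (fun p => [p.1, p.2])
                     then [a] else [])) [] := by
    apply PySem.List.foldl_congr_mem
    intro common a _
    exact inner_fold a _ common hnodup
  rw [houter,
    PySem.List.foldl_append_eq_flatMap
      (g := fun a => if a ∈ (nbrsP rows cols nx ny).map (fun p => [p.1, p.2])
                     then [a] else [])]
  have hflat :
      ((nbrsP rows cols x y).map (fun p => [p.1, p.2])).flatMap
        (fun a => if a ∈ (nbrsP rows cols nx ny).map (fun p => [p.1, p.2])
                  then [a] else []) =
      ((nbrsP rows cols x y).map (fun p => [p.1, p.2])).filter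
        (fun a => decide (a ∈ (nbrsP rows cols nx ny).map (fun p => [p.1, p.2]))) := by
    induction (nbrsP rows cols x y).map (fun p => [p.1, p.2]) with
    | nil => rfl
    | cons h t ih =>
      simp only [List.flatMap_cons, List.filter_cons, ih]
      by_cases hm : h ∈ (nbrsP rows cols nx ny).map (fun p => [p.1, p.2]) <;>
        simp [hm]
  rw [hflat, filter_map_mem _ pairToRow_inj]
  simp only [List.nil_append]
  -- B's loop as filter+map over the direction list
  rw [PySem.List.foldl_append_ite (p := fun d : Int × Int =>
        0 ≤ x + d.1 ∧ x + d.1 < rows ∧ 0 ≤ y + d.2 ∧ y + d.2 < cols ∧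
          (x + d.1 - nx).natAbs + (y + d.2 - ny).natAbs = 1)
      (f := fun d : Int × Int => [x + d.1, y + d.2])]
  simp only [List.nil_append]
  -- A side: filter over nbrsP x y = filter of conjunction over direction list
  rw [nbrsP_inter]
  simp only [List.map_map, Function.comp_def, pvDirsA]
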